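-- pv_equiv track=rewrite | github.com/Anastasia9974/assistent_bot | work_str.py | form_answer
-- ===== SOURCE A (Python) =====
-- def form_answer(answ_answ,answ_data):
--     vvv = ""
--     a = answ_answ
--     delit = 0
--     for x in range(len(a)):
--         if x + 2 < len(a) and (a[x] != '\\' or a[x + 1] != 'r') and delit == 0:
--             vvv = vvv + f"{a[x]}"
--         elif x + 2 >= len(a) and delit == 0:
--             vvv = vvv + f"{a[x]}"
--             continue
--         elif delit == 0:
--             vvv = vvv + f"\n"
--             delit = 3
--         else:
--             delit -= 1
--     #
--     if answ_data != '0':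
--         b = answ_data[-3:]
--         if b != 'ipg':
--             vvv = vvv + f"\n\r"
--             vvv = vvv + f"{answ_data}"
--     return vvv
-- ===== SOURCE B (Python) =====
-- def form_answer(answ_answ, answ_data):
--     # single forward scan with an index jump instead of a per-index loop with a skip counter
--     chunks = []
--     s = answ_answ
--     n = len(s)
--     i = 0
--     while i < n:
--         if i + 2 < n and s[i] == '\\' and s[i + 1] == 'r':
--             chunks.append('\n')
--             i += 4
--         else:
--             chunks.append(s[i])
--             i += 1
--     if answ_data != '0' and not answ_data.endswith('ipg'):
--         chunks.append('\n\r')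
--         chunks.append(answ_data)
--     return ''.join(chunks)
-- ===== Notes on version B (the rewrite author's own statement) =====
-- stated objective: simpler
-- what changed: Replaced A's per-index for-loop with a decrement skip-counter and repeated string concatenation by a single index-jumping while-scan that consumes each 4-char backslash-r block in one step and joins collected chunks, with the suffix test written as endswith.
import Mathlib
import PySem

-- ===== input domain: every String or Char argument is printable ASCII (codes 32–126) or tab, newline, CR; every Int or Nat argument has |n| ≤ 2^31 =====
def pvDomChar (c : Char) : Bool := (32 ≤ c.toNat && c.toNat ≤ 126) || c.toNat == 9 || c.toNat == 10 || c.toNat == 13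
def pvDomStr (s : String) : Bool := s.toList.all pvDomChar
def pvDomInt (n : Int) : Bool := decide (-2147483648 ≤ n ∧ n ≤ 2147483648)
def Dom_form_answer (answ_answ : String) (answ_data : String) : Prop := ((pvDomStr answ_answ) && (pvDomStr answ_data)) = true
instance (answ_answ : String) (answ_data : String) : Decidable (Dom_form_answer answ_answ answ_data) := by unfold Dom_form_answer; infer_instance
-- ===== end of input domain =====

-- B replaces A's per-index loop with a decrement skip-counter by a single index-jumping scan
-- (consume the 4-char '\r'-marker block in one step); objective: simpler, same return value.

-- ===== PORT A =====
-- A's for-loop over range(len(a)) with state (vvv, delit), transliterated as recursion on the index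
def pvLoopA (a : List Char) (n : Nat) (x : Nat) (vvv : List Char) (delit : Nat) : List Char :=
  if x < n then
    if x + 2 < n ∧ (a.getD x ' ' ≠ '\\' ∨ a.getD (x+1) ' ' ≠ 'r') ∧ delit = 0 then
      pvLoopA a n (x+1) (vvv ++ [a.getD x ' ']) delit
    else if x + 2 ≥ n ∧ delit = 0 then
      pvLoopA a n (x+1) (vvv ++ [a.getD x ' ']) delit
    else if delit = 0 then
      pvLoopA a n (x+1) (vvv ++ ['\n']) 3
    else
      pvLoopA a n (x+1) vvv (delit - 1)
  else vvv
termination_by n - x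
decreasing_by all_goals omega

def form_answer (answ_answ : String) (answ_data : String) : String :=
  let a := answ_answ.toList
  let vvv := pvLoopA a a.length 0 [] 0
  let vvv :=
    if answ_data ≠ "0" then
      -- b = answ_data[-3:]; if b != 'ipg': vvv += '\n\r' + answ_data
      if PySem.List.slice answ_data.toList (some (-3)) none ≠ ['i', 'p', 'g'] then
        vvv ++ ['\n', '\r'] ++ answ_data.toList
      else vvv
    else vvv
  String.ofList vvv

-- ===== PORT B =====
-- B's while loop: l is the unread tail s[i:]; marker test = i+2<n ∧ s[i]='\\' ∧ s[i+1]='r'; i += 4 ⇒ drop 3 of the tail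
def pvGoB (l : List Char) : List Char :=
  match l with
  | [] => []
  | c :: rest =>
      if c = '\\' ∧ rest.head? = some 'r' ∧ 2 ≤ rest.length then
        '\n' :: pvGoB (rest.drop 3)
      else
        c :: pvGoB rest
termination_by l.length
decreasing_by all_goals simp [List.length_drop]

def form_answer_alt (answ_answ : String) (answ_data : String) : String :=
  let body := pvGoB answ_answ.toList
  let suffix :=
    if answ_data ≠ "0" ∧ PySem.Str.endswith answ_data "ipg" = false then
      '\n' :: '\r' :: answ_data.toList
    else []
  String.ofList (body ++ suffix)

-- ===== PRECONDITION & SPEC =====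
def Spec_form_answer (answ_answ : String) (answ_data : String) (out : String) : Prop := out = form_answer_alt answ_answ answ_data
instance (answ_answ : String) (answ_data : String) (out : String) : Decidable (Spec_form_answer answ_answ answ_data out) := by unfold Spec_form_answer; infer_instance

-- ===== CLAIM (what is proved, stated in full; the proofs are below) =====
def Claim_equal_form_answer : Prop := ∀ (answ_answ : String) (answ_data : String), Dom_form_answer answ_answ answ_data → Spec_form_answer answ_answ answ_data (form_answer answ_answ answ_data)

-- ===== LEMMAS AND PROOFS =====

-- A's loop from index x with delit = 0 produces B's scan of the remaining tail
lemma pvLoopA_eq_goB (a : List Char) :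
    ∀ (m x : Nat) (vvv : List Char), a.length - x ≤ m → x ≤ a.length →
      pvLoopA a a.length x vvv 0 = vvv ++ pvGoB (a.drop x) := by
  intro m
  induction m with
  | zero =>
      intro x vvv hm hx
      have hxn : x = a.length := by omega
      subst hxn
      rw [pvLoopA]
      simp [pvGoB, List.drop_length]
  | succ m ih =>
      intro x vvv hm hx
      by_cases hlt : x < a.length
      · have hdrop : a.drop x = a[x] :: a.drop (x+1) := List.drop_eq_getElem_cons hlt
        have hgx : a.getD x ' ' = a[x] := List.getD_eq_getElem a ' ' hlt
        by_cases h2 : x + 2 < a.length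
        · have hx1 : x + 1 < a.length := by omega
          have hgx1 : a.getD (x+1) ' ' = a[x+1] := List.getD_eq_getElem a ' ' hx1
          have hdrop1 : a.drop (x+1) = a[x+1] :: a.drop (x+2) :=
            List.drop_eq_getElem_cons hx1
          by_cases hmk : a[x] = '\\' ∧ a[x+1] = 'r'
          · -- marker: A sets delit := 3 and appends '\n'; B consumes 4 chars
            obtain ⟨hc0, hc1⟩ := hmk
            rw [pvLoopA, if_pos hlt,
                if_neg (by
                  rintro ⟨-, hne, -⟩
                  rw [hgx, hgx1] at hne
                  rcases hne with h | h
                  · exact h hc0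
                  · exact h hc1),
                if_neg (by rintro ⟨h, -⟩; omega), if_pos rfl]
            rw [pvLoopA, if_pos hx1,
                if_neg (by simp), if_neg (by simp), if_neg (by simp)]
            rw [pvLoopA, if_pos h2,
                if_neg (by simp), if_neg (by simp), if_neg (by simp)]
            have hlen1 : 2 ≤ (a.drop (x+1)).length := by
              rw [List.length_drop]; omega
            have hgoB : pvGoB (a.drop x) = '\n' :: pvGoB ((a.drop (x+1)).drop 3) := by
              rw [hdrop, pvGoB]
              rw [if_pos ⟨hc0, by rw [hdrop1]; simp [hc1], hlen1⟩]
            have hdd : (a.drop (x+1)).drop 3 = a.drop (x+4) := by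
              rw [List.drop_drop]
            by_cases h3 : x + 3 < a.length
            · -- iteration x+3 runs (delit 1 → 0), then recurse at x+4
              rw [pvLoopA, if_pos h3,
                  if_neg (by simp), if_neg (by simp), if_neg (by simp)]
              rw [ih (x+4) (vvv ++ ['\n']) (by omega) (by omega)]
              rw [hgoB, hdd]
              simp
            · -- the string ends inside the skipped block
              rw [pvLoopA, if_neg (by omega)]
              rw [hgoB, hdd]
              have hnil : a.drop (x+4) = [] := List.drop_eq_nil_of_le (by omega)
              rw [hnil]
              simp [pvGoB]
          · -- no marker at x (middle of the string): both sides emit a[x]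
            have hne : a.getD x ' ' ≠ '\\' ∨ a.getD (x+1) ' ' ≠ 'r' := by
              rw [hgx, hgx1]
              by_cases hcc : a[x] = '\\'
              · right; intro hr; exact hmk ⟨hcc, hr⟩
              · left; exact hcc
            have hgoB : pvGoB (a.drop x) = a[x] :: pvGoB (a.drop (x+1)) := by
              rw [hdrop, pvGoB]
              rw [if_neg ?_]
              rintro ⟨hc0, hh, -⟩
              rw [hdrop1, List.head?_cons] at hh
              exact hmk ⟨hc0, Option.some.inj hh⟩
            rw [pvLoopA, if_pos hlt, if_pos ⟨h2, hne, rfl⟩, hgx]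
            rw [ih (x+1) (vvv ++ [a[x]]) (by omega) (by omega), hgoB]
            simp
        · -- within two characters of the end: A's second branch, B's default branch
          have hgoB : pvGoB (a.drop x) = a[x] :: pvGoB (a.drop (x+1)) := by
            rw [hdrop, pvGoB]
            rw [if_neg ?_]
            rintro ⟨-, -, hl⟩
            rw [List.length_drop] at hl
            omega
          rw [pvLoopA, if_pos hlt, if_neg (by rintro ⟨h, -⟩; omega),
              if_pos ⟨by omega, rfl⟩, hgx]
          rw [ih (x+1) (vvv ++ [a[x]]) (by omega) (by omega), hgoB]
          simp
      · have hxn : x = a.length := by omega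
        subst hxn
        rw [pvLoopA]
        simp [pvGoB, List.drop_length]

-- the two suffix tests agree: answ_data[-3:] != 'ipg'  ⟺  not answ_data.endswith('ipg')
lemma suffix_test_eq (d : String) :
    (PySem.List.slice d.toList (some (-3)) none ≠ ['i', 'p', 'g'])
      ↔ PySem.Str.endswith d "ipg" = false := by
  rw [PySem.List.slice_from_neg_ofNat d.toList 3 (by omega)]
  rw [PySem.Str.endswith_eq]
  constructor
  · intro hne
    rw [Bool.eq_false_iff]
    intro hend
    have hsuf : ("ipg".toList) <:+ d.toList :=
      (PySem.Chars.endswith_iff _ _).mp hend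
    have := List.suffix_iff_eq_drop.mp hsuf
    simp only [show ("ipg".toList) = ['i','p','g'] from rfl] at this
    exact hne this.symm
  · intro hend heq
    have hsuf : ("ipg".toList) <:+ d.toList := by
      rw [List.suffix_iff_eq_drop]
      simpa using heq.symm
    have := (PySem.Chars.endswith_iff d.toList "ipg".toList).mpr hsuf
    rw [this] at hend
    cases hend

-- ===== VERDICT (by name: the statement is the Claim_ definition above) =====
theorem form_answer_spec : Claim_equal_form_answer := by
  intro answ_answ answ_data _
  unfold Spec_form_answer
  have hbody : pvLoopA answ_answ.toList answ_answ.toList.length 0 [] 0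
      = pvGoB answ_answ.toList := by
    simpa using pvLoopA_eq_goB answ_answ.toList answ_answ.toList.length 0 []
      (by omega) (by omega)
  simp only [form_answer, form_answer_alt]
  rw [hbody]
  split_ifs with h1 h2 h3 h4 h5
  · simp
  · exact absurd ⟨h1, (suffix_test_eq answ_data).mp h2⟩ h3
  · exact absurd ((suffix_test_eq answ_data).mpr h4.2) h2
  · simp
  · exact absurd h5.1 h1
  · simp
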